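-- pv_equiv track=rewrite | github.com/mathuranika/DSA | countBalanced.py | countBalanced
-- ===== SOURCE A (Python) =====
-- def countBalanced(arr):
--     # code here
--     idx ={0:1}
--     vo = ['a','e','i','o','u']
--     total =0
--     ans = 0
--     for i in arr:
--         curr = 0
--         for j in i:
--             if j in vo:
--                 curr+=1
--             else:
--                 curr-=1
--
--         total += curr
--         if total in idx:
--             ans+= idx[total]
--         idx[total] =idx.setdefault(total,0) +1
--     return ans
-- ===== SOURCE B (Python) =====
-- def countBalanced(arr):
--     vowels = set('aeiou')
--     bals = [sum(1 if c in vowels else -1 for c in w) for w in arr]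
--
--     def zeros_from(lst):
--         running = 0
--         cnt = 0
--         for x in lst:
--             running += x
--             if running == 0:
--                 cnt += 1
--         return cnt
--
--     ans = 0
--     rest = bals
--     while rest:
--         ans += zeros_from(rest)
--         rest = rest[1:]
--     return ans
-- ===== Notes on version B (the rewrite author's own statement) =====
-- stated objective: alternative
-- what changed: Replaced A's prefix-sum dictionary counting with a brute-force scan over all subarray start positions: per-word balances are precomputed once, then for each suffix a running sum counts the zero-sum prefixes.
import Mathlib
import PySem

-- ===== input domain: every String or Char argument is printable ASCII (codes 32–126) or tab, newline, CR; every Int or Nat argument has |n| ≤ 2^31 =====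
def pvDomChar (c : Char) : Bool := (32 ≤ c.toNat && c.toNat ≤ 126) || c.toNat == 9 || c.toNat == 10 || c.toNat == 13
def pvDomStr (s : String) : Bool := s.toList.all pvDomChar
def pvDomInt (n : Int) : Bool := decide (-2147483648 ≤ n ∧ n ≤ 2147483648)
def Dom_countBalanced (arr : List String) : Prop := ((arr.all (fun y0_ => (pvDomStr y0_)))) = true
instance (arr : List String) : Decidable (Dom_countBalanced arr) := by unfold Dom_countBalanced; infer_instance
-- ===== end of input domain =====

-- B replaces A's prefix-sum dictionary with a brute-force scan over all start positions
-- (precomputed per-word balances, one running-sum pass per suffix); alternative decomposition, not faster.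

-- ===== PORT A =====
def pvVo : List Char := ['a', 'e', 'i', 'o', 'u']

def pvCurrA (w : String) : Int :=
  w.toList.foldl (fun curr j => if pvVo.contains j then curr + 1 else curr - 1) 0

def countBalanced (arr : List String) : Int :=
  (arr.foldl (fun (s : PySem.Dict Int Int × Int × Int) i =>
      let curr := pvCurrA i
      let total := s.2.1 + curr
      -- `ans += idx[total]` is guarded by `total in idx`, so getD is exact here
      let ans := if s.1.contains total then s.2.2 + s.1.getD total 0 else s.2.2
      let d1 := s.1.setdefault total 0
      (d1.insert total (d1.getD total 0 + 1), total, ans))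
    (PySem.Dict.empty.insert 0 1, 0, 0)).2.2

-- ===== PORT B =====
def pvVowelsB : PySem.Set Char := PySem.Set.ofList "aeiou".toList

def pvBalB (w : String) : Int :=
  (w.toList.map (fun c => if pvVowelsB.contains c then (1 : Int) else -1)).sum

def pvZerosFrom (lst : List Int) : Int :=
  (lst.foldl (fun (s : Int × Int) x =>
      let running := s.1 + x
      (running, if running = 0 then s.2 + 1 else s.2)) (0, 0)).2

def pvSuffSum : List Int → Int
  | [] => 0
  | x :: xs => pvZerosFrom (x :: xs) + pvSuffSum xs

def countBalanced_alt (arr : List String) : Int :=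
  pvSuffSum (arr.map pvBalB)

-- ===== PRECONDITION & SPEC =====
def Spec_countBalanced (arr : List String) (out : Int) : Prop := out = countBalanced_alt arr
instance (arr : List String) (out : Int) : Decidable (Spec_countBalanced arr out) := by unfold Spec_countBalanced; infer_instance

-- ===== CLAIM (what is proved, stated in full; the proofs are below) =====
def Claim_equal_countBalanced : Prop := ∀ (arr : List String), Dom_countBalanced arr → Spec_countBalanced arr (countBalanced arr)

-- ===== LEMMAS AND PROOFS =====

-- A's loop step, factored over the word's precomputed balance value
def pvStepInt (s : PySem.Dict Int Int × Int × Int) (curr : Int) : PySem.Dict Int Int × Int × Int :=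
  let total := s.2.1 + curr
  let ans := if s.1.contains total then s.2.2 + s.1.getD total 0 else s.2.2
  let d1 := s.1.setdefault total 0
  (d1.insert total (d1.getD total 0 + 1), total, ans)

-- the dictionary A maintains, as a function of the list of prefix sums seen so far
def pvC (h : List Int) : PySem.Dict Int Int :=
  h.foldl (fun d x => d.insert x (d.getD x 0 + 1)) PySem.Dict.empty

-- ans added by A on remaining balances l, given history h of prefix sums and current total t
def pvG (h : List Int) (t : Int) : List Int → Int
  | [] => 0
  | x :: xs => (h.count (t + x) : Int) + pvG (h ++ [t + x]) (t + x) xs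

-- hits of the running prefix sums (from t) inside the bag h
def pvH (h : List Int) (t : Int) : List Int → Int
  | [] => 0
  | x :: xs => (h.count (t + x) : Int) + pvH h (t + x) xs

theorem pvH_nil (t : Int) (l : List Int) : pvH [] t l = 0 := by
  induction l generalizing t with
  | nil => rfl
  | cons x xs ih => simp [pvH, ih]

theorem pvH_append (h1 h2 : List Int) (t : Int) (l : List Int) :
    pvH (h1 ++ h2) t l = pvH h1 t l + pvH h2 t l := by
  induction l generalizing t with
  | nil => rfl
  | cons x xs ih => simp [pvH, ih]; ring

theorem pvH_single_shift (c t : Int) (l : List Int) :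
    pvH [c] t l = pvH [0] (t - c) l := by
  induction l generalizing t with
  | nil => rfl
  | cons x xs ih =>
    simp only [pvH, ih (t + x)]
    have : (List.count (t + x) [c] : Int) = (List.count (t - c + x) [0] : Int) := by
      simp only [List.count_singleton]
      split_ifs <;> simp_all <;> omega
    rw [this]
    ring_nf

theorem pvZerosFrom_aux (l : List Int) (r c : Int) :
    (l.foldl (fun (s : Int × Int) x =>
      let running := s.1 + x
      (running, if running = 0 then s.2 + 1 else s.2)) (r, c)).2 = c + pvH [0] r l := by
  induction l generalizing r c with
  | nil => simp [pvH]
  | cons x xs ih =>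
    simp only [List.foldl_cons, ih, pvH, List.count_singleton]
    split_ifs <;> simp_all <;> omega

theorem pvZerosFrom_eq (l : List Int) : pvZerosFrom l = pvH [0] 0 l := by
  unfold pvZerosFrom
  rw [pvZerosFrom_aux]
  ring

theorem pvG_main (l : List Int) (h' : List Int) (t : Int) :
    pvG (h' ++ [t]) t l = pvH h' t l + pvSuffSum l := by
  induction l generalizing h' t with
  | nil => simp [pvG, pvH, pvSuffSum]
  | cons x xs ih =>
    have step : pvG (h' ++ [t]) t (x :: xs)
        = ((h' ++ [t]).count (t + x) : Int) + pvG ((h' ++ [t]) ++ [t + x]) (t + x) xs := rfl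
    rw [step, ih (h' ++ [t]) (t + x)]
    rw [pvH_append h' [t] (t + x) xs, pvH_single_shift t (t + x) xs]
    have hz : pvZerosFrom (x :: xs) = pvH [0] 0 (x :: xs) := pvZerosFrom_eq _
    have hcnt : ((h' ++ [t]).count (t + x) : Int)
        = (h'.count (t + x) : Int) + ([t].count (t + x) : Int) := by
      rw [List.count_append]; push_cast; ring
    have hone : (([t].count (t + x) : Int)) = (([0] : List Int).count x : Int) := by
      simp only [List.count_singleton]
      split_ifs <;> simp_all
    simp only [pvSuffSum, pvH, hz, hcnt, hone]
    have hsh : t + x - t = x := by ring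
    rw [hsh]
    ring

theorem pvC_getD (h : List Int) (v : Int) : (pvC h).getD v 0 = (h.count v : Int) := by
  unfold pvC
  rw [PySem.Dict.getD_foldl_insert_add_one]
  simp [PySem.Dict.getD_empty]

theorem pvC_contains (h : List Int) (v : Int) : (pvC h).contains v = true ↔ v ∈ h := by
  unfold pvC
  rw [PySem.Dict.contains_iff_mem_keys, PySem.Dict.keys_foldl_insert]
  simp only [PySem.Dict.keys_empty]
  rw [show PySem.Set.update ([] : PySem.Set Int) h = PySem.Set.ofList h from rfl]
  exact PySem.Set.mem_ofList h v

theorem pvSetdefault_insert (d : PySem.Dict Int Int) (k : Int) :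
    ((d.setdefault k 0).insert k ((d.setdefault k 0).getD k 0 + 1)) = d.insert k (d.getD k 0 + 1) := by
  by_cases hc : d.contains k = true
  · simp [PySem.Dict.setdefault, hc]
  · have hsd : d.setdefault k 0 = d.insert k 0 := by
      simp [PySem.Dict.setdefault, PySem.Dict.insert, hc]
    rw [hsd, PySem.Dict.getD_insert_self, PySem.Dict.insert_insert_self,
      PySem.Dict.getD_of_not_contains d 0 (by simpa using hc)]

theorem pvC_step (h : List Int) (t : Int) :
    pvC (h ++ [t]) = (pvC h).insert t ((pvC h).getD t 0 + 1) := by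
  unfold pvC
  rw [List.foldl_append]
  rfl

theorem pvAInv (l : List Int) (h : List Int) (t a : Int) :
    (l.foldl pvStepInt (pvC h, t, a)).2.2 = a + pvG h t l := by
  induction l generalizing h t a with
  | nil => simp [pvG]
  | cons x xs ih =>
    have hdict : ((pvC h).setdefault (t + x) 0).insert (t + x)
        (((pvC h).setdefault (t + x) 0).getD (t + x) 0 + 1) = pvC (h ++ [t + x]) := by
      rw [pvSetdefault_insert, pvC_step]
    have hans : (if (pvC h).contains (t + x) then a + (pvC h).getD (t + x) 0 else a)
        = a + (h.count (t + x) : Int) := by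
      by_cases hc : (pvC h).contains (t + x) = true
      · rw [if_pos hc, pvC_getD]
      · rw [if_neg hc]
        have : (t + x) ∉ h := fun hm => hc ((pvC_contains h (t + x)).mpr hm)
        rw [List.count_eq_zero.mpr this]
        simp
    have hstep : pvStepInt (pvC h, t, a) x = (pvC (h ++ [t + x]), t + x, a + (h.count (t + x) : Int)) := by
      simp only [pvStepInt, hdict, hans]
    rw [List.foldl_cons, hstep, ih]
    simp [pvG]
    ring

theorem pvVowels_contains (c : Char) : pvVowelsB.contains c = pvVo.contains c := rfl

theorem pvFoldPM (l : List Char) (a : Int) :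
    l.foldl (fun curr j => if pvVo.contains j then curr + 1 else curr - 1) a
      = a + (l.map (fun c => if pvVo.contains c then (1 : Int) else -1)).sum := by
  induction l generalizing a with
  | nil => simp
  | cons c cs ih =>
    rw [List.foldl_cons, ih, List.map_cons, List.sum_cons]
    by_cases h : pvVo.contains c = true
    · rw [if_pos h, if_pos h]; ring
    · rw [if_neg h, if_neg h]; ring

theorem pvBal_eq (w : String) : pvCurrA w = pvBalB w := by
  unfold pvCurrA pvBalB
  rw [pvFoldPM, zero_add]
  exact congrArg List.sum (List.map_congr_left fun c _ => by rw [pvVowels_contains])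

theorem pvC_singleton : pvC [0] = PySem.Dict.empty.insert 0 1 := by decide

theorem countBalanced_eq_fold (arr : List String) :
    countBalanced arr = ((arr.map pvCurrA).foldl pvStepInt (PySem.Dict.empty.insert 0 1, 0, 0)).2.2 := by
  rw [List.foldl_map]
  rfl

-- ===== VERDICT (by name: the statement is the Claim_ definition above) =====
theorem countBalanced_spec : Claim_equal_countBalanced := by
  intro arr _
  show countBalanced arr = countBalanced_alt arr
  rw [countBalanced_eq_fold, ← pvC_singleton, pvAInv]
  rw [show ([0] : List Int) = [] ++ [0] from rfl, pvG_main, pvH_nil]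
  unfold countBalanced_alt
  rw [show arr.map pvCurrA = arr.map pvBalB from List.map_congr_left (fun w _ => pvBal_eq w)]
  ring
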